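-- pv_equiv track=rewrite | github.com/Disability-Community-Resource-Fair/Disability-Community-Resource-Fair.github.io | generate_vendor_directory.py | format_table_number_set
-- ===== SOURCE A (Python) =====
-- def format_table_number_set(number_values):
--     if not number_values:
--         return ''
--
--     def sort_key(value):
--         if isinstance(value, int):
--             return (0, value)
--         return (1, str(value))
--
--     return ', '.join(str(value) for value in sorted(number_values, key=sort_key))
-- ===== SOURCE B (Python) =====
-- def _merge(xs, ys):
--     out = []
--     i = j = 0
--     while i < len(xs) and j < len(ys):
--         if xs[i] <= ys[j]:
--             out.append(xs[i])
--             i += 1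
--         else:
--             out.append(ys[j])
--             j += 1
--     out.extend(xs[i:])
--     out.extend(ys[j:])
--     return out
--
--
-- def _msort(vals):
--     if len(vals) <= 1:
--         return vals[:]
--     mid = len(vals) // 2
--     return _merge(_msort(vals[:mid]), _msort(vals[mid:]))
--
--
-- def format_table_number_set(number_values):
--     if not number_values:
--         return ''
--     return ', '.join(map(str, _msort(number_values)))
-- ===== Notes on version B (the rewrite author's own statement) =====
-- stated objective: alternative
-- what changed: Replaces the built-in sort with the composite (0, value)/(1, str) key by a hand-written top-down merge sort with plain integer comparison, then joins the result.
import Mathlib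
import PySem

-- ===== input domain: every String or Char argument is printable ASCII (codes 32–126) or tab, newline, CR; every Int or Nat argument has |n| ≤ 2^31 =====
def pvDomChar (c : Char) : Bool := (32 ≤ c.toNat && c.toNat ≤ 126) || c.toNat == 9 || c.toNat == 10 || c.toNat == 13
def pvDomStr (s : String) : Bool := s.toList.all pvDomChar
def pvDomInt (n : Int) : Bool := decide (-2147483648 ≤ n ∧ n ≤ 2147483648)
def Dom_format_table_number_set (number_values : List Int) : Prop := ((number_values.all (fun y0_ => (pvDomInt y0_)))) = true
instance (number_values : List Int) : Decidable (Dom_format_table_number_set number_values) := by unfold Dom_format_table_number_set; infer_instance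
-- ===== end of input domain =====

-- B sorts with a hand-written top-down merge sort (plain integer comparison) instead of A's
-- built-in composite-key sort; same joined string (alternative algorithm, same result).


-- ===== PORT A =====
-- sort_key: on Int input isinstance(value, int) is always true, so key value = (0, value);
-- the tuple key is ported with PySem.List.sorted2.
def format_table_number_set (number_values : List Int) : String :=
  if number_values = [] then ""
  else
    PySem.Str.join ", "
      ((PySem.List.sorted2 number_values (fun _ => (0 : Int)) (fun value => value)).map
        PySem.Int.toStr)

-- ===== PORT B =====
-- _merge of Source B: the two-pointer while loop plus the two extends of the leftovers
def pvMerge : List Int → List Int → List Int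
  | [], ys => ys
  | x :: xs, [] => x :: xs
  | x :: xs, y :: ys =>
      if x ≤ y then x :: pvMerge xs (y :: ys) else y :: pvMerge (x :: xs) ys

-- _msort of Source B: split at len // 2, sort the halves, merge
def pvMsort (vals : List Int) : List Int :=
  if vals.length ≤ 1 then vals
  else
    pvMerge (pvMsort (vals.take (vals.length / 2))) (pvMsort (vals.drop (vals.length / 2)))
termination_by vals.length
decreasing_by
  · simp; omega
  · simp; omega

def format_table_number_set_alt (number_values : List Int) : String :=
  if number_values = [] then ""
  else PySem.Str.join ", " ((pvMsort number_values).map PySem.Int.toStr)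

-- ===== PRECONDITION & SPEC =====
def Spec_format_table_number_set (number_values : List Int) (out : String) : Prop := out = format_table_number_set_alt number_values
instance (number_values : List Int) (out : String) : Decidable (Spec_format_table_number_set number_values out) := by unfold Spec_format_table_number_set; infer_instance

-- ===== CLAIM (what is proved, stated in full; the proofs are below) =====
def Claim_equal_format_table_number_set : Prop := ∀ (number_values : List Int), Dom_format_table_number_set number_values → Spec_format_table_number_set number_values (format_table_number_set number_values)

-- ===== LEMMAS AND PROOFS =====

-- A's constant-first-component tuple key collapses to the identity key
theorem sorted2_const_fst (xs : List Int) :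
    PySem.List.sorted2 xs (fun _ => (0 : Int)) (fun value => value) =
      PySem.List.sorted xs (fun value => value) := by
  unfold PySem.List.sorted2 PySem.List.sorted
  simp

theorem pvMerge_eq_merge (xs ys : List Int) :
    pvMerge xs ys = List.merge xs ys (fun a b => decide (a ≤ b)) := by
  fun_induction pvMerge with
  | case1 ys => simp
  | case2 x xs => simp
  | case3 x xs y ys h ih => simp [h, ih]
  | case4 x xs y ys h ih => simp [h, ih]

theorem pvMsort_perm (vals : List Int) : (pvMsort vals).Perm vals := by
  fun_induction pvMsort with
  | case1 vals h => exact List.Perm.refl _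
  | case2 vals h ih1 ih2 =>
    rw [pvMerge_eq_merge]
    refine (List.merge_perm_append _).trans ?_
    refine (List.Perm.append ih1 ih2).trans ?_
    simp

theorem pvMsort_pairwise (vals : List Int) : (pvMsort vals).Pairwise (· ≤ ·) := by
  fun_induction pvMsort with
  | case1 vals h =>
    interval_cases h' : vals.length
    · simp_all [List.length_eq_zero_iff]
    · rcases List.length_eq_one_iff.mp h' with ⟨a, rfl⟩; simp
  | case2 vals h ih1 ih2 =>
    rw [pvMerge_eq_merge]
    exact List.Pairwise.merge ih1 ih2

-- ===== VERDICT (by name: the statement is the Claim_ definition above) =====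
theorem format_table_number_set_spec : Claim_equal_format_table_number_set := by
  intro xs _
  unfold Spec_format_table_number_set format_table_number_set format_table_number_set_alt
  by_cases hx : xs = []
  · simp [hx]
  · simp only [hx, ite_false]
    rw [sorted2_const_fst,
      PySem.List.sorted_id_eq_of_perm_of_pairwise _ _ (pvMsort_perm xs) (pvMsort_pairwise xs)]
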